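-- pv_equiv track=rewrite | github.com/simonfqy/SimonfqyGitHub | lintcode/medium/248_count_of_smaller_number.py | countOfSmallerNumber
-- ===== SOURCE A (Python) =====
-- def countOfSmallerNumber(A, queries):
--     res = []
--     A.sort()
--     for query_val in queries:
--         smaller_count = 0
--         for val in A:
--             if val >= query_val:
--                 break
--             smaller_count += 1
--         res.append(smaller_count)
--     return res
-- ===== SOURCE B (Python) =====
-- def countOfSmallerNumber(A, queries):
--     A.sort()
--     def bl(q):
--         lo, hi = 0, len(A)
--         while lo < hi:
--             mid = (lo + hi) // 2
--             if A[mid] < q: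
--                 lo = mid + 1
--             else:
--                 hi = mid
--         return lo
--     return [bl(q) for q in queries]
-- ===== Notes on version B (the rewrite author's own statement) =====
-- stated objective: faster
-- what changed: replaces A's linear scan of the sorted array per query with a binary search (hand-rolled bisect_left) per query
import Mathlib
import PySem

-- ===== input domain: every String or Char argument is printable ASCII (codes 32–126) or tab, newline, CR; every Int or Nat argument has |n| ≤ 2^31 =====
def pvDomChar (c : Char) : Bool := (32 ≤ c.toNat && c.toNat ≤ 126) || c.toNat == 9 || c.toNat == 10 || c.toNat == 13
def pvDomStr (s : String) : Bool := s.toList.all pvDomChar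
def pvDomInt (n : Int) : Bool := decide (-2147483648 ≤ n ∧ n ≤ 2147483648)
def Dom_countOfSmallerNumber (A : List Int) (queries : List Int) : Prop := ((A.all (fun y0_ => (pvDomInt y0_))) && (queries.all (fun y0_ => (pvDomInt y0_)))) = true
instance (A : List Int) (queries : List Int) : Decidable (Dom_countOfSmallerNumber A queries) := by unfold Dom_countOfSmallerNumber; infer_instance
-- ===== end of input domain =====

-- B replaces A's linear scan of the sorted list per query with a binary search (bisect_left)
-- per query: asymptotically faster. Both sort the argument list in place in Python; the
-- equivalence proved here is about the return value.

-- ===== PORT A =====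
-- inner 'for val in A: if val >= q: break; smaller_count += 1' loop of A
def pvScan (q : Int) : List Int → Int
  | [] => 0
  | v :: rest => if v ≥ q then 0 else pvScan q rest + 1

def countOfSmallerNumber (A : List Int) (queries : List Int) : List Int :=
  let s := PySem.List.sorted A (fun x => x) false
  queries.map (fun q => pvScan q s)

-- ===== PORT B =====
-- hand-rolled bisect_left loop of Source B; the index mid is always in range while lo < hi ≤ len,
-- so List.getD mid 0 is exactly Python's A[mid] here; fuel = len is only a totality guard
-- (hi - lo shrinks every iteration and starts at len, so the fuel is never exhausted)
def pvBl (fuel : Nat) (s : List Int) (q : Int) (lo hi : Nat) : Nat :=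
  match fuel with
  | 0 => lo
  | fuel + 1 =>
    if lo < hi then
      let mid := (lo + hi) / 2
      if s.getD mid 0 < q then pvBl fuel s q (mid + 1) hi else pvBl fuel s q lo mid
    else lo

def countOfSmallerNumber_alt (A : List Int) (queries : List Int) : List Int :=
  let s := PySem.List.sorted A (fun x => x) false
  queries.map (fun q => (pvBl s.length s q 0 s.length : Int))

-- ===== PRECONDITION & SPEC =====
def Spec_countOfSmallerNumber (A : List Int) (queries : List Int) (out : List Int) : Prop := out = countOfSmallerNumber_alt A queries
instance (A : List Int) (queries : List Int) (out : List Int) : Decidable (Spec_countOfSmallerNumber A queries out) := by unfold Spec_countOfSmallerNumber; infer_instance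

-- ===== CLAIM (what is proved, stated in full; the proofs are below) =====
def Claim_equal_countOfSmallerNumber : Prop := ∀ (A : List Int) (queries : List Int), Dom_countOfSmallerNumber A queries → Spec_countOfSmallerNumber A queries (countOfSmallerNumber A queries)

-- ===== LEMMAS AND PROOFS =====

-- natural-number version of A's inner scan, for index reasoning
def pvScanN (q : Int) : List Int → Nat
  | [] => 0
  | v :: rest => if v ≥ q then 0 else pvScanN q rest + 1

theorem pvScan_eq_scanN (q : Int) (s : List Int) : pvScan q s = (pvScanN q s : Int) := by
  induction s with
  | nil => rfl
  | cons v rest ih => simp [pvScan, pvScanN]; split_ifs <;> simp [ih]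

theorem pvScanN_le (q : Int) (s : List Int) : pvScanN q s ≤ s.length := by
  induction s with
  | nil => simp [pvScanN]
  | cons v rest ih => simp [pvScanN]; split_ifs <;> omega

theorem pvScanN_lt (q : Int) (s : List Int) : ∀ j (hj : j < s.length), j < pvScanN q s → s[j] < q := by
  induction s with
  | nil => intro j hj; simp at hj
  | cons v rest ih =>
    intro j hj hlt
    simp [pvScanN] at hlt
    split_ifs at hlt with hv
    · omega
    · cases j with
      | zero => simpa using lt_of_not_ge hv
      | succ j' => exact ih j' (by simpa using hj) (by omega)

theorem pvScanN_ge (q : Int) (s : List Int) (hs : s.Pairwise (· ≤ ·)) :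
    ∀ j (hj : j < s.length), pvScanN q s ≤ j → q ≤ s[j] := by
  induction s with
  | nil => intro j hj; simp at hj
  | cons v rest ih =>
    intro j hj hle
    rcases List.pairwise_cons.mp hs with ⟨hv, htail⟩
    simp [pvScanN] at hle
    split_ifs at hle with hvq
    · cases j with
      | zero => simpa using hvq
      | succ j' =>
        have hj' : j' < rest.length := by simpa using hj
        have := hv _ (List.getElem_mem hj')
        simpa using le_trans hvq this
    · cases j with
      | zero => omega
      | succ j' => exact ih htail j' (by simpa using hj) (by omega)

-- correctness of the binary-search loop: it finds the unique boundary k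
theorem pvBl_eq (s : List Int) (q : Int) (k : Nat)
    (_hk : k ≤ s.length)
    (hlo : ∀ j (hj : j < s.length), j < k → s[j] < q)
    (hhi : ∀ j (hj : j < s.length), k ≤ j → q ≤ s[j]) :
    ∀ n lo hi, hi - lo ≤ n → lo ≤ k → k ≤ hi → hi ≤ s.length → pvBl n s q lo hi = k := by
  intro n
  induction n with
  | zero =>
    intro lo hi h0 h1 h2 h3
    simp only [pvBl]
    omega
  | succ n ih =>
    intro lo hi h0 h1 h2 h3
    simp only [pvBl]
    by_cases h : lo < hi
    case neg => simp only [if_neg h]; omega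
    simp only [if_pos h]
    have hmid : (lo + hi) / 2 < s.length := by omega
    have hg : s.getD ((lo + hi) / 2) 0 = s[(lo + hi) / 2] := List.getD_eq_getElem s 0 hmid
    by_cases hc : s.getD ((lo + hi) / 2) 0 < q
    · simp only [hc, if_true]
      have : (lo + hi) / 2 < k := by
        by_contra hcon
        have := hhi _ hmid (by omega)
        rw [hg] at hc; omega
      exact ih ((lo + hi) / 2 + 1) hi (by omega) (by omega) h2 h3
    · simp only [hc, if_false]
      have : k ≤ (lo + hi) / 2 := by
        by_contra hcon
        have := hlo _ hmid (by omega)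
        rw [hg] at hc; omega
      exact ih lo ((lo + hi) / 2) (by omega) h1 this (by omega)

-- ===== VERDICT (by name: the statement is the Claim_ definition above) =====
theorem countOfSmallerNumber_spec : Claim_equal_countOfSmallerNumber := by
  intro A queries _
  unfold Spec_countOfSmallerNumber countOfSmallerNumber countOfSmallerNumber_alt
  simp only [List.map_inj_left]
  intro q _
  set s := PySem.List.sorted A (fun x => x) false with hs
  have hpw : s.Pairwise (· ≤ ·) := by
    simpa using PySem.List.sorted_pairwise A (fun x => x)
  rw [pvScan_eq_scanN,
      pvBl_eq s q (pvScanN q s) (pvScanN_le q s) (pvScanN_lt q s) (pvScanN_ge q s hpw)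
        s.length 0 s.length (by omega) (Nat.zero_le _) (pvScanN_le q s) le_rfl]
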